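-- pv_equiv track=rewrite | github.com/bde574786/Baeckjoon-Online-Judge | 백준/Silver/1541. 잃어버린 괄호/잃어버린 괄호.py | minimize_expression
-- ===== SOURCE A (Python) =====
-- def minimize_expression(expression):
--     parts = expression.split('-')
--
--     first_part_sum  = sum(map(int, parts[0].split('+')))
--
--     other_sum = 0
--     for part in parts[1:]:
--         numbers = part.split('+')
--         part_sum = 0
--         for number in numbers:
--             part_sum += int(number)
--         other_sum += part_sum
--
--     return first_part_sum  - other_sum
-- ===== SOURCE B (Python) =====
-- def minimize_expression(expression):
--     parts = expression.split('-')
--     total = sum(int(tok) for part in parts for tok in part.split('+'))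
--     first = sum(int(tok) for tok in parts[0].split('+'))
--     return 2 * first - total
-- ===== Notes on version B (the rewrite author's own statement) =====
-- stated objective: simpler
-- what changed: Replaces A's nested subtraction loop with the algebraic identity answer = 2*first_group_sum - total_sum_of_all_numbers, computed from two flat sums.
import Mathlib
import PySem

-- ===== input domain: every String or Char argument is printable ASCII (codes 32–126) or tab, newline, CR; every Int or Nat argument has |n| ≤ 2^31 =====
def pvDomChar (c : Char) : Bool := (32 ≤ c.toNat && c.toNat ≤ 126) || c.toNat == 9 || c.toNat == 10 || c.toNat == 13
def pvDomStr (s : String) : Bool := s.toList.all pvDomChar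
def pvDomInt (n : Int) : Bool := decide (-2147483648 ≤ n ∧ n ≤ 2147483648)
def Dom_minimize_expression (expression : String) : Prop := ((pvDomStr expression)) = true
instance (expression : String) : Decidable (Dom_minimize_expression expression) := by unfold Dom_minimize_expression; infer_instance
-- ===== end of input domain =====

-- ===== PORT A =====
-- B changes only the arithmetic decomposition (2*first - total instead of first - rest); return values proved equal on Pre_.
-- int(token) as both Pythons call it; Pre_ guarantees every token parses, so the default 0 is never taken on Pre_.
def pyInt (t : List Char) : Int := (PySem.Int.ofChars? t).getD 0

def minimize_expression (expression : String) : Int :=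
  let parts := PySem.Chars.splitOn expression.toList ['-']
  let first_part_sum := ((PySem.Chars.splitOn (PySem.List.pyGetD parts 0 []) ['+']).map pyInt).sum
  let other_sum := (PySem.List.slice parts (some 1) none).foldl
    (fun other_sum part =>
      let numbers := PySem.Chars.splitOn part ['+']
      let part_sum := numbers.foldl (fun part_sum number => part_sum + pyInt number) 0
      other_sum + part_sum) 0
  first_part_sum - other_sum

-- ===== PORT B =====
def minimize_expression_alt (expression : String) : Int :=
  let parts := PySem.Chars.splitOn expression.toList ['-']
  let total := ((parts.flatMap (fun part => PySem.Chars.splitOn part ['+'])).map pyInt).sum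
  let first := ((PySem.Chars.splitOn (PySem.List.pyGetD parts 0 []) ['+']).map pyInt).sum
  2 * first - total

-- ===== PRECONDITION & SPEC =====
-- Exactly the inputs where Python's int() succeeds on every token, i.e. where A returns (else A raises ValueError).
def Pre_minimize_expression (expression : String) : Prop :=
  ∀ part ∈ PySem.Chars.splitOn expression.toList ['-'],
    ∀ tok ∈ PySem.Chars.splitOn part ['+'], (PySem.Int.ofChars? tok).isSome = true
instance (expression : String) : Decidable (Pre_minimize_expression expression) := by
  unfold Pre_minimize_expression; infer_instance
def pvWitness_minimize_expression : String := "55-50+40"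

def Spec_minimize_expression (expression : String) (out : Int) : Prop := out = minimize_expression_alt expression
instance (expression : String) (out : Int) : Decidable (Spec_minimize_expression expression out) := by
  unfold Spec_minimize_expression; infer_instance

-- ===== CLAIM (what is proved, stated in full; the proofs are below) =====
def Claim_equal_minimize_expression : Prop := ∀ (expression : String), Dom_minimize_expression expression → Pre_minimize_expression expression → Spec_minimize_expression expression (minimize_expression expression)

-- ===== LEMMAS AND PROOFS =====
theorem splitOn_go_ne_nil (sep : List Char) :
    ∀ fuel l cur acc, PySem.Chars.splitOn.go sep fuel l cur acc ≠ [] := by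
  intro fuel
  induction fuel with
  | zero => intro l cur acc; simp [PySem.Chars.splitOn.go]
  | succ n ih =>
    intro l cur acc
    cases l with
    | nil => simp [PySem.Chars.splitOn.go]
    | cons c rest =>
      rw [PySem.Chars.splitOn.go]
      split
      · exact ih _ _ _
      · exact ih _ _ _

theorem splitOn_ne_nil (s sep : List Char) : PySem.Chars.splitOn s sep ≠ [] := by
  unfold PySem.Chars.splitOn
  exact splitOn_go_ne_nil sep _ s [] []

-- ===== VERDICT (by name: the statement is the Claim_ definition above) =====
theorem minimize_expression_spec : Claim_equal_minimize_expression := by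
  intro expression _ _
  unfold Spec_minimize_expression minimize_expression minimize_expression_alt
  obtain ⟨p0, rest, hp⟩ :=
    List.exists_cons_of_ne_nil (splitOn_ne_nil expression.toList ['-'])
  simp only [hp, PySem.List.pyGetD_zero_cons, PySem.List.slice_from_one, List.tail_cons,
    List.flatMap_cons, List.map_append, List.sum_append, PySem.List.foldl_add]
  have hflat : ∀ (l : List (List Char)),
      ((l.flatMap (fun part => PySem.Chars.splitOn part ['+'])).map pyInt).sum
      = (l.map (fun x => ((PySem.Chars.splitOn x ['+']).map pyInt).sum)).sum := by
    intro l
    induction l with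
    | nil => simp
    | cons q qs ihq => simp [List.flatMap_cons, List.sum_append, ihq]
  rw [hflat]
  simp only [zero_add]
  ring
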